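-- pv_equiv track=rewrite | github.com/ethanp/programming | StuffIWrote/Python/adventofcode/2013/code/day7.py | possibilities
-- ===== SOURCE A (Python) =====
-- cardRanks = ['A', 'K', 'Q', 'J', 'T', '9', '8', '7', '6', '5', '4', '3', '2']
--
-- def possibilities(withoutJs):
--     if len(withoutJs) == 5:
--         return [withoutJs]
--     if len(withoutJs) == 4:
--         return (withoutJs + v for v in cardRanks)
--     if len(withoutJs) == 3:
--         return (withoutJs + ''.join((a, b))
--                 for a in cardRanks
--                 for b in cardRanks)
--     if len(withoutJs) == 2:
--         return (withoutJs + ''.join((a, b, c))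
--                 for a in cardRanks
--                 for b in cardRanks
--                 for c in cardRanks)
--     return 'AAAAA'
-- ===== SOURCE B (Python) =====
-- cardRanks = ['A', 'K', 'Q', 'J', 'T', '9', '8', '7', '6', '5', '4', '3', '2']
--
-- def possibilities(withoutJs):
--     if len(withoutJs) == 5:
--         return [withoutJs]
--     if 2 <= len(withoutJs) <= 4:
--         combos = ['']
--         for _ in range(5 - len(withoutJs)):
--             combos = [c + r for c in cardRanks for r in combos]
--         return (withoutJs + r for r in combos)
--     return 'AAAAA'
-- ===== Notes on version B (the rewrite author's own statement) =====
-- stated objective: idiomatic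
-- what changed: B replaces A's three separate fixed-depth nested comprehensions (for lengths 4, 3, 2) with one iterated cartesian-product loop that builds all 5-len(withoutJs) letter fill-ins in the same lexicographic order.
-- outside the precondition, e.g. on possibilities('ABCDEF'): A returns 'AAAAA', B returns 'AAAAA'; on possibilities('A'): A returns 'AAAAA', B returns 'AAAAA'
import Mathlib
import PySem

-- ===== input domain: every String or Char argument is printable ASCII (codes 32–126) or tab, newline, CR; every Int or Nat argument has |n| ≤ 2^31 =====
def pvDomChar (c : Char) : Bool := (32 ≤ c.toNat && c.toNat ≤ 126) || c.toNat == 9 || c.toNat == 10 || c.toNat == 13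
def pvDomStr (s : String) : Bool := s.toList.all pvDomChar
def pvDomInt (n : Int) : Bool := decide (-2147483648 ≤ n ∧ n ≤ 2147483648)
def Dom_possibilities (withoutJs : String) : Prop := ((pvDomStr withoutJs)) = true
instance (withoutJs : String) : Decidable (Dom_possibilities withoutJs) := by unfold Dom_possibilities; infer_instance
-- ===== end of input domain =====

-- B replaces A's three separate fixed-depth nested comprehensions with one iterated
-- cartesian-product loop over the 5 - len(withoutJs) missing positions (idiomatic; same cost).
-- Pre_ excludes strings whose length is outside 2..5: there A returns a bare fallback string,
-- which is not a list of strings (not a value of the declared return type).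


-- ===== PORT A =====
def cardRanks : List String := ["A", "K", "Q", "J", "T", "9", "8", "7", "6", "5", "4", "3", "2"]

def possibilities (withoutJs : String) : List String :=
  if PySem.Str.len withoutJs = 5 then [withoutJs]
  else if PySem.Str.len withoutJs = 4 then
    cardRanks.map (fun v => withoutJs ++ v)
  else if PySem.Str.len withoutJs = 3 then
    cardRanks.flatMap (fun a => cardRanks.map (fun b => withoutJs ++ (a ++ b)))
  else if PySem.Str.len withoutJs = 2 then
    cardRanks.flatMap (fun a => cardRanks.flatMap (fun b =>
      cardRanks.map (fun c => withoutJs ++ (a ++ b ++ c))))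
  else []  -- Python A returns the bare five-card fallback string here (not a list); excluded by Pre_

-- ===== PORT B =====
-- the loop `for _ in range(k): combos = [c + r for c in cardRanks for r in combos]`
def combosB : Nat → List String
  | 0 => [""]
  | k + 1 => cardRanks.flatMap (fun c => (combosB k).map (fun r => c ++ r))

def possibilities_alt (withoutJs : String) : List String :=
  if PySem.Str.len withoutJs = 5 then [withoutJs]
  else if 2 ≤ PySem.Str.len withoutJs ∧ PySem.Str.len withoutJs ≤ 4 then
    (combosB (5 - PySem.Str.len withoutJs).toNat).map (fun r => withoutJs ++ r)
  else []  -- Python B returns the bare five-card fallback string here (not a list); excluded by Pre_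

-- ===== PRECONDITION & SPEC =====
-- Pre_ excludes exactly the strings of length outside 2..5, on which A returns the bare
-- fallback string instead of a list of strings (no value of the declared return type exists).
def Pre_possibilities (withoutJs : String) : Prop :=
  2 ≤ PySem.Str.len withoutJs ∧ PySem.Str.len withoutJs ≤ 5
instance (withoutJs : String) : Decidable (Pre_possibilities withoutJs) := by
  unfold Pre_possibilities; infer_instance

def pvWitness_possibilities : String := "AK"

def Spec_possibilities (withoutJs : String) (out : List String) : Prop := out = possibilities_alt withoutJs
instance (withoutJs : String) (out : List String) : Decidable (Spec_possibilities withoutJs out) := by unfold Spec_possibilities; infer_instance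

-- ===== CLAIM (what is proved, stated in full; the proofs are below) =====
def Claim_equal_possibilities : Prop := ∀ (withoutJs : String), Dom_possibilities withoutJs → Pre_possibilities withoutJs → Spec_possibilities withoutJs (possibilities withoutJs)

-- ===== LEMMAS AND PROOFS =====
theorem combosB_one : combosB 1 = cardRanks := by decide

theorem combosB_two :
    combosB 2 = cardRanks.flatMap (fun a => cardRanks.map (fun b => a ++ b)) := by
  show cardRanks.flatMap (fun a => (combosB 1).map (fun r => a ++ r)) = _
  rw [combosB_one]

theorem combosB_three :
    combosB 3 = cardRanks.flatMap (fun a => cardRanks.flatMap (fun b =>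
      cardRanks.map (fun c => a ++ b ++ c))) := by
  show cardRanks.flatMap (fun a => (combosB 2).map (fun r => a ++ r)) = _
  rw [combosB_two]
  simp only [List.map_flatMap, List.map_map, Function.comp_def, String.append_assoc]

theorem possibilities_spec : Claim_equal_possibilities := by
  intro w _ hpre
  unfold Pre_possibilities at hpre
  unfold Spec_possibilities possibilities possibilities_alt
  simp only [PySem.Str.len_eq] at hpre ⊢
  have hn : w.toList.length = 2 ∨ w.toList.length = 3 ∨ w.toList.length = 4 ∨ w.toList.length = 5 := by omega
  rcases hn with h | h | h | h <;> simp [h, combosB_one, combosB_two, combosB_three,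
    List.map_flatMap, List.map_map, Function.comp_def]
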